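-- pv_equiv track=rewrite | github.com/key-moon/golf-compressor | deflate_optimizer/blocks/huffman.py | length_to_code_and_extra
-- ===== SOURCE A (Python) =====
-- LEN_BASES = [
--     3,4,5,6,7,8,9,10,11,13,15,17,19,23,27,31,
--     35,43,51,59,67,83,99,115,131,163,195,227,258
-- ]
--
-- LEN_EXTRA = [
--     0,0,0,0,0,0,0,0,1,1,1,1,2,2,2,2,
--     3,3,3,3,4,4,4,4,5,5,5,5,0
-- ]
--
-- def length_to_code_and_extra(length: int) -> tuple[int,int,int]:
--     if length < 3 or length > 258:
--         raise ValueError("length out of range")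
--     if length == 258:
--         return 285, 0, 0
--     for i in range(len(LEN_BASES)-1):
--         base = LEN_BASES[i]; nextb = LEN_BASES[i+1]
--         if base <= length < nextb:
--             return 257 + i, length - base, LEN_EXTRA[i]
--     return 285, 0, 0
-- ===== SOURCE B (Python) =====
-- LEN_BASES = [
--     3,4,5,6,7,8,9,10,11,13,15,17,19,23,27,31,
--     35,43,51,59,67,83,99,115,131,163,195,227,258
-- ]
--
-- LEN_EXTRA = [
--     0,0,0,0,0,0,0,0,1,1,1,1,2,2,2,2,
--     3,3,3,3,4,4,4,4,5,5,5,5,0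
-- ]
--
-- # Prebuilt lookup table: LEN_TABLE[L] = (code, extra_value, extra_bits) for 3 <= L <= 258.
-- LEN_TABLE = [(0, 0, 0)] * 259
-- for _i in range(len(LEN_BASES) - 1):
--     for _L in range(LEN_BASES[_i], LEN_BASES[_i + 1]):
--         LEN_TABLE[_L] = (257 + _i, _L - LEN_BASES[_i], LEN_EXTRA[_i])
-- LEN_TABLE[258] = (285, 0, 0)
--
-- def length_to_code_and_extra(length: int) -> tuple[int, int, int]:
--     if length < 3 or length > 258:
--         raise ValueError("length out of range")
--     return LEN_TABLE[length]
-- ===== Notes on version B (the rewrite author's own statement) =====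
-- stated objective: idiomatic
-- what changed: Replaced the runtime interval-scanning loop with a module-level 259-entry lookup table built once by expanding each [base,next) interval; the function itself is a guard plus a single index lookup.
import Mathlib
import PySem

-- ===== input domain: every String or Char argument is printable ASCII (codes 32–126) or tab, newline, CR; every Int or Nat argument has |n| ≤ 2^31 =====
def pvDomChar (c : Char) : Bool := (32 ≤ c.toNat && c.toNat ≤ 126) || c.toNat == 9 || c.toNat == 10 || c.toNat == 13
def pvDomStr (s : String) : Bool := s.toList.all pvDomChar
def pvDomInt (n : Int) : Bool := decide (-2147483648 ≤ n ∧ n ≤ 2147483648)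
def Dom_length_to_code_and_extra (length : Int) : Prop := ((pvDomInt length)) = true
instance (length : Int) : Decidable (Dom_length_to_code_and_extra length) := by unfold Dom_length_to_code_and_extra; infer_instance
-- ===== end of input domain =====

-- ===== PORT A =====
-- B changes A's per-call interval scan into a one-time precomputed lookup table (idiomatic); same return value on 3..258.
def pvLenBases : List Int := [3,4,5,6,7,8,9,10,11,13,15,17,19,23,27,31,35,43,51,59,67,83,99,115,131,163,195,227,258]
def pvLenExtra : List Int := [0,0,0,0,0,0,0,0,1,1,1,1,2,2,2,2,3,3,3,3,4,4,4,4,5,5,5,5,0]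

def length_to_code_and_extra (length : Int) : Int × Int × Int :=
  if length < 3 ∨ length > 258 then (0, 0, 0)  -- Python raises ValueError here; excluded by Pre_
  else if length = 258 then (285, 0, 0)
  else
    -- for i in range(len(LEN_BASES)-1): first matching interval wins (early return)
    match (PySem.List.pyRange 0 28 1).foldl (fun acc i =>
        match acc with
        | some r => some r
        | none =>
          let base := (PySem.List.pyGet? pvLenBases i).getD 0
          let nextb := (PySem.List.pyGet? pvLenBases (i + 1)).getD 0
          if base ≤ length ∧ length < nextb then
            some (257 + i, length - base, (PySem.List.pyGet? pvLenExtra i).getD 0)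
          else none) none with
    | some r => r
    | none => (285, 0, 0)

-- ===== PORT B =====
-- table build: for i in range(28): for L in range(LEN_BASES[i], LEN_BASES[i+1]): LEN_TABLE[L] = ...; LEN_TABLE[258] = (285,0,0)
def pvLenTable : List (Int × Int × Int) :=
  let t := List.replicate 259 ((0 : Int), (0 : Int), (0 : Int))
  let t := (PySem.List.pyRange 0 28 1).foldl (fun t i =>
    let base := (PySem.List.pyGet? pvLenBases i).getD 0
    let nextb := (PySem.List.pyGet? pvLenBases (i + 1)).getD 0
    (PySem.List.pyRange base nextb 1).foldl
      (fun t L => t.set L.toNat (257 + i, L - base, (PySem.List.pyGet? pvLenExtra i).getD 0)) t) t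
  t.set 258 (285, 0, 0)

def length_to_code_and_extra_alt (length : Int) : Int × Int × Int :=
  if length < 3 ∨ length > 258 then (0, 0, 0)  -- Python raises ValueError here; excluded by Pre_
  else (PySem.List.pyGet? pvLenTable length).getD (0, 0, 0)

-- ===== PRECONDITION & SPEC =====
-- Pre_ excludes exactly the inputs on which A raises ValueError (length out of 3..258).
def Pre_length_to_code_and_extra (length : Int) : Prop := 3 ≤ length ∧ length ≤ 258
instance (length : Int) : Decidable (Pre_length_to_code_and_extra length) := by unfold Pre_length_to_code_and_extra; infer_instance
def pvWitness_length_to_code_and_extra : Int := 17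
def Spec_length_to_code_and_extra (length : Int) (out : Int × Int × Int) : Prop := out = length_to_code_and_extra_alt length
instance (length : Int) (out : Int × Int × Int) : Decidable (Spec_length_to_code_and_extra length out) := by unfold Spec_length_to_code_and_extra; infer_instance

-- ===== CLAIM (what is proved, stated in full; the proofs are below) =====
def Claim_equal_length_to_code_and_extra : Prop := ∀ (length : Int), Dom_length_to_code_and_extra length → Pre_length_to_code_and_extra length → Spec_length_to_code_and_extra length (length_to_code_and_extra length)

-- ===== LEMMAS AND PROOFS =====
-- All 256 admissible inputs checked by kernel evaluation.
set_option maxRecDepth 40000 in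
set_option maxHeartbeats 1000000 in
theorem pv_all_agree : ∀ n : Fin 256, length_to_code_and_extra ((n : Nat) + 3) = length_to_code_and_extra_alt ((n : Nat) + 3) := by decide

-- ===== VERDICT (by name: the statement is the Claim_ definition above) =====
theorem length_to_code_and_extra_spec : Claim_equal_length_to_code_and_extra := by
  intro length _ hpre
  obtain ⟨h3, h258⟩ := hpre
  have hn : length = ((((length - 3).toNat : Nat) : Int) + 3) := by omega
  have hlt : (length - 3).toNat < 256 := by omega
  unfold Spec_length_to_code_and_extra
  rw [hn]
  exact pv_all_agree ⟨(length - 3).toNat, hlt⟩
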